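-- pv_equiv track=rewrite | github.com/juliafealves/linguagem-programacao-1 | unidade-6/ordena-tipos/ordena_tipos.py | ordena_tipos
-- ===== SOURCE A (Python) =====
-- def ordena_tipos(lista):
--     inteiros = []
--     letras = []
--     outros = []
--
--     for elemento in lista:
--         if elemento.isdigit():
--             inteiros.append(elemento)
--         elif elemento.isalpha():
--             letras.append(elemento)
--         else:
--             outros.append(elemento)
--
--     return inteiros + letras + outros
-- ===== SOURCE B (Python) =====
-- def ordena_tipos(lista):
--     return sorted(lista, key=lambda e: 0 if e.isdigit() else 1 if e.isalpha() else 2)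
-- ===== Notes on version B (the rewrite author's own statement) =====
-- stated objective: idiomatic
-- what changed: Replaces the three manual buckets plus concatenation with a single stable sort keyed on the category rank (0 digit, 1 alpha, 2 other); sort stability yields the same order.
import Mathlib
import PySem

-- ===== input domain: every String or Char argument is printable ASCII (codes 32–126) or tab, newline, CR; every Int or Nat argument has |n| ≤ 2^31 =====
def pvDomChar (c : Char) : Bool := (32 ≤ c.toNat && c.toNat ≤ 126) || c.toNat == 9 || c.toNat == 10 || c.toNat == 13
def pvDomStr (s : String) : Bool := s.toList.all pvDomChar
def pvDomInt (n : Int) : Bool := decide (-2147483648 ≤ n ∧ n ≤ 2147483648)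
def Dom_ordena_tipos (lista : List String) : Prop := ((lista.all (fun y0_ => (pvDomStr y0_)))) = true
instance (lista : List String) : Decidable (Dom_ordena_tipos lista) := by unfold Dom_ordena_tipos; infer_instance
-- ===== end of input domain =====

-- B replaces the three manual buckets with one stable sort keyed on the category rank (idiomatic rewrite, same cost class).


-- ===== PORT A =====
-- the loop appending each element to one of three bucket lists, then concatenation
def ordena_tipos (lista : List String) : List String :=
  let acc := lista.foldl
    (fun (acc : List String × List String × List String) elemento =>
      if PySem.Str.strIsdigit elemento then (acc.1 ++ [elemento], acc.2.1, acc.2.2)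
      else if PySem.Str.strIsalpha elemento then (acc.1, acc.2.1 ++ [elemento], acc.2.2)
      else (acc.1, acc.2.1, acc.2.2 ++ [elemento]))
    ([], [], [])
  acc.1 ++ acc.2.1 ++ acc.2.2

-- ===== PORT B =====
-- the key: 0 if e.isdigit() else 1 if e.isalpha() else 2
def pvRank (e : String) : Int :=
  if PySem.Str.strIsdigit e then 0 else if PySem.Str.strIsalpha e then 1 else 2

def ordena_tipos_alt (lista : List String) : List String :=
  PySem.List.sorted lista pvRank

-- ===== PRECONDITION & SPEC =====
def Spec_ordena_tipos (lista : List String) (out : List String) : Prop := out = ordena_tipos_alt lista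
instance (lista : List String) (out : List String) : Decidable (Spec_ordena_tipos lista out) := by unfold Spec_ordena_tipos; infer_instance

-- ===== CLAIM (what is proved, stated in full; the proofs are below) =====
def Claim_equal_ordena_tipos : Prop := ∀ (lista : List String), Dom_ordena_tipos lista → Spec_ordena_tipos lista (ordena_tipos lista)

-- ===== LEMMAS AND PROOFS =====

theorem pvRank_cases (e : String) : pvRank e = 0 ∨ pvRank e = 1 ∨ pvRank e = 2 := by
  unfold pvRank; split_ifs <;> simp

-- inserting past a prefix none of whose elements triggers `before`
theorem insertBy_append_left {α : Type} (before : α → α → Bool) (x : α) (A rest : List α)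
    (h : ∀ y ∈ A, before x y = false) :
    PySem.List.insertBy before x (A ++ rest) = A ++ PySem.List.insertBy before x rest := by
  induction A with
  | nil => rfl
  | cons a as ih =>
    simp only [List.cons_append, PySem.List.insertBy, h a (by simp), if_false, Bool.false_eq_true]
    rw [ih (fun y hy => h y (by simp [hy]))]

-- inserting in front of a list whose every element triggers `before`
theorem insertBy_front {α : Type} (before : α → α → Bool) (x : α) (rest : List α)
    (h : ∀ y ∈ rest, before x y = true) :
    PySem.List.insertBy before x rest = x :: rest := by
  cases rest with
  | nil => rfl
  | cons y ys => simp [PySem.List.insertBy, h y (by simp)]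

-- B's stable insertion sort by rank keeps three pure rank buckets concatenated
theorem sorted_rank_inv (xs f0 f1 f2 : List String)
    (h0 : ∀ y ∈ f0, pvRank y = 0) (h1 : ∀ y ∈ f1, pvRank y = 1) (h2 : ∀ y ∈ f2, pvRank y = 2) :
    xs.foldl (fun acc x => PySem.List.insertBy (fun a b => decide (pvRank a < pvRank b)) x acc)
      (f0 ++ f1 ++ f2)
    = (f0 ++ xs.filter (fun e => pvRank e = 0)) ++ (f1 ++ xs.filter (fun e => pvRank e = 1))
      ++ (f2 ++ xs.filter (fun e => pvRank e = 2)) := by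
  induction xs generalizing f0 f1 f2 with
  | nil => simp
  | cons x xs ih =>
    simp only [List.foldl_cons, List.filter_cons]
    rcases pvRank_cases x with hx | hx | hx
    · have step : PySem.List.insertBy (fun a b => decide (pvRank a < pvRank b)) x (f0 ++ f1 ++ f2)
          = (f0 ++ [x]) ++ f1 ++ f2 := by
        rw [List.append_assoc,
          insertBy_append_left _ x f0 (f1 ++ f2) (by intro y hy; simp [hx, h0 y hy]),
          insertBy_front _ x (f1 ++ f2) (by
            intro y hy; rcases List.mem_append.mp hy with h | h
            · simp [hx, h1 y h]
            · simp [hx, h2 y h])]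
        simp
      have ih' := ih (f0 ++ [x]) f1 f2
        (by intro y hy; rcases List.mem_append.mp hy with h | h
            · exact h0 y h
            · rw [List.mem_singleton.mp h]; exact hx) h1 h2
      rw [step, ih']
      simp [hx]
    · have step : PySem.List.insertBy (fun a b => decide (pvRank a < pvRank b)) x (f0 ++ f1 ++ f2)
          = f0 ++ (f1 ++ [x]) ++ f2 := by
        rw [insertBy_append_left _ x (f0 ++ f1) f2 (by
            intro y hy; rcases List.mem_append.mp hy with h | h
            · simp [hx, h0 y h]
            · simp [hx, h1 y h]),
          insertBy_front _ x f2 (by intro y hy; simp [hx, h2 y hy])]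
        simp
      have ih' := ih f0 (f1 ++ [x]) f2 h0
        (by intro y hy; rcases List.mem_append.mp hy with h | h
            · exact h1 y h
            · rw [List.mem_singleton.mp h]; exact hx) h2
      rw [step, ih']
      simp [hx]
    · have step : PySem.List.insertBy (fun a b => decide (pvRank a < pvRank b)) x (f0 ++ f1 ++ f2)
          = f0 ++ f1 ++ (f2 ++ [x]) := by
        rw [PySem.List.insertBy_of_forall_not_before _ x (f0 ++ f1 ++ f2) (by
            intro y hy; rcases pvRank_cases y with h | h | h <;> simp [hx, h])]
        simp
      have ih' := ih f0 f1 (f2 ++ [x]) h0 h1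
        (by intro y hy; rcases List.mem_append.mp hy with h | h
            · exact h2 y h
            · rw [List.mem_singleton.mp h]; exact hx)
      rw [step, ih']
      simp [hx]

-- A's bucket loop computes the three rank filters
theorem bucket_inv (xs : List String) (i l o : List String) :
    xs.foldl
      (fun (acc : List String × List String × List String) elemento =>
        if PySem.Str.strIsdigit elemento then (acc.1 ++ [elemento], acc.2.1, acc.2.2)
        else if PySem.Str.strIsalpha elemento then (acc.1, acc.2.1 ++ [elemento], acc.2.2)
        else (acc.1, acc.2.1, acc.2.2 ++ [elemento]))
      (i, l, o)
    = (i ++ xs.filter (fun e => pvRank e = 0), l ++ xs.filter (fun e => pvRank e = 1),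
       o ++ xs.filter (fun e => pvRank e = 2)) := by
  induction xs generalizing i l o with
  | nil => simp
  | cons x xs ih =>
    by_cases hd : PySem.Str.strIsdigit x = true
    · simp only [List.foldl_cons, if_pos hd, ih, List.filter_cons]
      simp only [PySem.Str.strIsdigit_eq] at hd
      simp [pvRank, hd]
    · by_cases ha : PySem.Str.strIsalpha x = true
      · simp only [List.foldl_cons, if_neg hd, if_pos ha, ih, List.filter_cons]
        simp only [PySem.Str.strIsdigit_eq] at hd
        simp only [PySem.Str.strIsalpha_eq] at ha
        simp [pvRank, hd, ha]
      · simp only [List.foldl_cons, if_neg hd, if_neg ha, ih, List.filter_cons]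
        simp only [PySem.Str.strIsdigit_eq] at hd
        simp only [PySem.Str.strIsalpha_eq] at ha
        simp [pvRank, hd, ha]

-- ===== VERDICT (by name: the statement is the Claim_ definition above) =====
theorem ordena_tipos_spec : Claim_equal_ordena_tipos := by
  intro lista _
  show ordena_tipos lista = ordena_tipos_alt lista
  have h := sorted_rank_inv lista [] [] [] (by simp) (by simp) (by simp)
  simp only [List.nil_append] at h
  simp only [ordena_tipos, ordena_tipos_alt]
  rw [bucket_inv, PySem.List.sorted_eq_foldl_insertBy, h]
  simp
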